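-- pv_equiv track=rewrite | github.com/vifezue/PythonWork | IT - 412/finalProject.bak/utilFunctions/functions.py | checkInvalidChars
-- ===== SOURCE A (Python) =====
-- def checkInvalidChars(string):
--     """Checks if passed in string has an invalid character
--
--     Arguments:
--         string {string} -- string
--
--     Returns:
--         Boolean -- True or false based on the condition
--     """
--     isValid = True
--     invalidChars = ["!", "@", "#", "$", "%", "^", "&", "*",
--                     "(", ")", "_", "=", "+", "<", ">", "/", "?", ";", ":", "[", "]", "{", "}", "\\", ")"]
--     for char in invalidChars:
--         if char in string:
--             return False
--     return True
-- ===== SOURCE B (Python) =====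
-- def checkInvalidChars(string):
--     """Checks if passed in string has an invalid character (single pass over
--     the string with one membership set, instead of one substring scan per
--     invalid character)."""
--     invalid = set("!@#$%^&*()_=+<>/?;:[]{}\\")
--     for ch in string:
--         if ch in invalid:
--             return False
--     return True
-- ===== Notes on version B (the rewrite author's own statement) =====
-- stated objective: idiomatic
-- what changed: B builds the set of invalid characters once and scans the input string a single time with O(1) set lookups, instead of A's one substring scan of the input per invalid character.
import Mathlib
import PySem

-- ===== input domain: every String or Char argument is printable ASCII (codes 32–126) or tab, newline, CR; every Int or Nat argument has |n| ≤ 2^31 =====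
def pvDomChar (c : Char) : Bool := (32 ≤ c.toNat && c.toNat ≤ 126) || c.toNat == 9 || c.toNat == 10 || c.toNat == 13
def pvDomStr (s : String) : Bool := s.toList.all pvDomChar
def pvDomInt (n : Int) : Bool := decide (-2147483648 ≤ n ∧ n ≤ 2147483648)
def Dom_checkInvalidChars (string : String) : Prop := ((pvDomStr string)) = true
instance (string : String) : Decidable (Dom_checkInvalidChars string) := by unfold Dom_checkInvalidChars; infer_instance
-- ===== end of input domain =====

-- B builds the invalid-character set once and scans the string a single time,
-- instead of A's one substring scan per invalid character (objective: idiomatic).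


-- ===== PORT A =====
-- A's list of invalid characters, duplicate ')' included, in source order.
def pvInvalidCharsA : List Char :=
  ['!', '@', '#', '$', '%', '^', '&', '*',
   '(', ')', '_', '=', '+', '<', '>', '/', '?', ';', ':', '[', ']', '{', '}', '\\', ')']

-- A's loop over the invalid characters, early-returning False on a hit
-- (Python's substring test with a 1-char needle is exactly membership in the char list)
def pvGoA : List Char → List Char → Bool
  | [], _ => true
  | c :: rest, s => if s.contains c then false else pvGoA rest s

def checkInvalidChars (string : String) : Bool :=
  pvGoA pvInvalidCharsA string.toList

-- ===== PORT B =====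
-- invalid = set("!@#$%^&*()_=+<>/?;:[]{}\\")
def pvInvalidSet : PySem.Set Char :=
  PySem.Set.ofList "!@#$%^&*()_=+<>/?;:[]{}\\".toList

-- B's single pass over the string, early-returning False on a set hit
def pvGoB : List Char → Bool
  | [] => true
  | c :: rest => if PySem.Set.contains pvInvalidSet c then false else pvGoB rest

def checkInvalidChars_alt (string : String) : Bool :=
  pvGoB string.toList

-- ===== PRECONDITION & SPEC =====
def Spec_checkInvalidChars (string : String) (out : Bool) : Prop := out = checkInvalidChars_alt string
instance (string : String) (out : Bool) : Decidable (Spec_checkInvalidChars string out) := by unfold Spec_checkInvalidChars; infer_instance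

-- ===== CLAIM (what is proved, stated in full; the proofs are below) =====
def Claim_equal_checkInvalidChars : Prop := ∀ (string : String), Dom_checkInvalidChars string → Spec_checkInvalidChars string (checkInvalidChars string)

-- ===== LEMMAS AND PROOFS =====
lemma pvGoA_eq_all (L s : List Char) :
    pvGoA L s = L.all (fun c => !s.contains c) := by
  induction L with
  | nil => rfl
  | cons c rest ih =>
    simp only [pvGoA, List.all_cons, ih]
    by_cases h : s.contains c <;> simp [h]

lemma pvGoB_eq_all (l : List Char) :
    pvGoB l = l.all (fun c => !PySem.Set.contains pvInvalidSet c) := by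
  induction l with
  | nil => rfl
  | cons c rest ih =>
    simp only [pvGoB, List.all_cons, ih]
    by_cases h : PySem.Set.contains pvInvalidSet c <;> simp [h]

lemma pvMem_iff (c : Char) :
    PySem.Set.contains pvInvalidSet c = true ↔ c ∈ pvInvalidCharsA := by
  unfold pvInvalidSet
  rw [PySem.Set.contains_iff, PySem.Set.mem_ofList]
  have h : pvInvalidCharsA = "!@#$%^&*()_=+<>/?;:[]{}\\".toList ++ [')'] := rfl
  rw [h, List.mem_append, List.mem_singleton]
  refine ⟨Or.inl, ?_⟩
  rintro (h1 | rfl)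
  · exact h1
  · decide

-- ===== VERDICT (by name: the statement is the Claim_ definition above) =====
theorem checkInvalidChars_spec : Claim_equal_checkInvalidChars := by
  intro s _
  show checkInvalidChars s = checkInvalidChars_alt s
  unfold checkInvalidChars checkInvalidChars_alt
  rw [pvGoA_eq_all, pvGoB_eq_all, Bool.eq_iff_iff]
  simp only [List.all_eq_true, Bool.not_eq_true', List.contains_eq_mem,
    decide_eq_false_iff_not, decide_eq_true_eq, Bool.eq_false_iff, Ne, pvMem_iff]
  exact ⟨fun h c hc hm => h _ hm hc, fun h c hc hm => h _ hm hc⟩
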